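-- pv_equiv track=rewrite | github.com/hidegmisi/hungary_2022_gerrymandering | src/hungary_ge/graph/national_adjacency.py | _neighbor_lists_from_edge_set
-- ===== SOURCE A (Python) =====
-- def _neighbor_lists_from_edge_set(
--     n_nodes: int,
--     edges: set[tuple[int, int]],
-- ) -> tuple[tuple[int, ...], ...]:
--     nbr: list[set[int]] = [set() for _ in range(n_nodes)]
--     for a, b in edges:
--         if not (0 <= a < n_nodes and 0 <= b < n_nodes):
--             msg = f"edge out of range: ({a}, {b}) for n_nodes={n_nodes}"
--             raise ValueError(msg)
--         nbr[a].add(b)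
--         nbr[b].add(a)
--     return tuple(tuple(sorted(s)) for s in nbr)
-- ===== SOURCE B (Python) =====
-- def _neighbor_lists_from_edge_set(
--     n_nodes: int,
--     edges: "set[tuple[int, int]]",
-- ) -> "tuple[tuple[int, ...], ...]":
--     flat: list[tuple[int, int]] = []
--     for a, b in edges:
--         if not (0 <= a < n_nodes and 0 <= b < n_nodes):
--             msg = f"edge out of range: ({a}, {b}) for n_nodes={n_nodes}"
--             raise ValueError(msg)
--         flat.append((a, b))
--         flat.append((b, a))
--     flat.sort()
--     out: list[list[int]] = [[] for _ in range(n_nodes)]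
--     for a, b in flat:
--         lst = out[a]
--         if not lst or lst[-1] != b:
--             lst.append(b)
--     return tuple(tuple(l) for l in out)
-- ===== Notes on version B (the rewrite author's own statement) =====
-- stated objective: alternative
-- what changed: B replaces A's per-node set-of-neighbours array (each set sorted separately at the end) by one flat list of directed pairs that is sorted once lexicographically and then grouped by source node with consecutive-duplicate skipping.
-- outside the precondition, e.g. on _neighbor_lists_from_edge_set(2, {(0, 2)}): A raises ValueError, B raises ValueError
import Mathlib
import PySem

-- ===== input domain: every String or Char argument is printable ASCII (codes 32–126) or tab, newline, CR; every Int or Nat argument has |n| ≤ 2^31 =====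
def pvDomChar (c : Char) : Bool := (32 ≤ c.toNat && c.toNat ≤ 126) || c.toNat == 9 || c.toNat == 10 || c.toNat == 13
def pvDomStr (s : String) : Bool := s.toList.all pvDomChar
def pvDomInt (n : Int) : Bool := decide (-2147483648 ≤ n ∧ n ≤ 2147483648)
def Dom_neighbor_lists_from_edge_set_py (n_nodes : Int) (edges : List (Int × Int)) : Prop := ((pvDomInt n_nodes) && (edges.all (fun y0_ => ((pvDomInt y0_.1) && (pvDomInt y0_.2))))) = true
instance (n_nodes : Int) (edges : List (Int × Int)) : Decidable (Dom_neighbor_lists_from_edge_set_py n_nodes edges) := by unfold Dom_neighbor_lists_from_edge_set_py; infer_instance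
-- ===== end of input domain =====

-- B builds one flat list of directed pairs, sorts it once and groups it, instead of A's
-- per-node sets each sorted separately (objective: alternative; return-value equivalence —
-- both languages' versions mutate nothing the caller sees).

-- ===== PORT A =====
def neighbor_lists_from_edge_set_py (n_nodes : Int) (edges : List (Int × Int)) : List (List Int) :=
  let nbr0 : List (PySem.Set Int) := List.replicate n_nodes.toNat PySem.Set.empty
  let nbr := edges.foldl (fun nbr e =>
    if 0 ≤ e.1 ∧ e.1 < n_nodes ∧ 0 ≤ e.2 ∧ e.2 < n_nodes then
      let nbr1 := nbr.set e.1.toNat (PySem.Set.add (PySem.List.pyGetD nbr e.1 PySem.Set.empty) e.2)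
      nbr1.set e.2.toNat (PySem.Set.add (PySem.List.pyGetD nbr1 e.2 PySem.Set.empty) e.1)
    else nbr  -- Python raises ValueError here; excluded by Pre_
    ) nbr0
  nbr.map (fun s => PySem.List.sorted s (fun x => x) false)

-- ===== PORT B =====
def neighbor_lists_from_edge_set_py_alt (n_nodes : Int) (edges : List (Int × Int)) : List (List Int) :=
  let flat := edges.foldl (fun acc e =>
    if 0 ≤ e.1 ∧ e.1 < n_nodes ∧ 0 ≤ e.2 ∧ e.2 < n_nodes then
      acc ++ [(e.1, e.2), (e.2, e.1)]
    else acc  -- Python raises ValueError here; excluded by Pre_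
    ) []
  let flatS := PySem.List.sorted2 flat Prod.fst Prod.snd
  let out0 : List (List Int) := List.replicate n_nodes.toNat []
  flatS.foldl (fun out p =>
    let lst := PySem.List.pyGetD out p.1 []
    out.set p.1.toNat (if lst.getLast? ≠ some p.2 then lst ++ [p.2] else lst)) out0

-- ===== PRECONDITION & SPEC =====
-- Pre_ excludes exactly the inputs on which the Python A raises ValueError (an edge endpoint out of [0, n_nodes)).
def Pre_neighbor_lists_from_edge_set_py (n_nodes : Int) (edges : List (Int × Int)) : Prop :=
  ∀ e ∈ edges, 0 ≤ e.1 ∧ e.1 < n_nodes ∧ 0 ≤ e.2 ∧ e.2 < n_nodes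
instance (n_nodes : Int) (edges : List (Int × Int)) : Decidable (Pre_neighbor_lists_from_edge_set_py n_nodes edges) := by unfold Pre_neighbor_lists_from_edge_set_py; infer_instance

def pvWitness_neighbor_lists_from_edge_set_py : Int × (List (Int × Int)) := (3, [(0, 1), (1, 2), (2, 2)])

def Spec_neighbor_lists_from_edge_set_py (n_nodes : Int) (edges : List (Int × Int)) (out : List (List Int)) : Prop := out = neighbor_lists_from_edge_set_py_alt n_nodes edges
instance (n_nodes : Int) (edges : List (Int × Int)) (out : List (List Int)) : Decidable (Spec_neighbor_lists_from_edge_set_py n_nodes edges out) := by unfold Spec_neighbor_lists_from_edge_set_py; infer_instance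

-- ===== CLAIM (what is proved, stated in full; the proofs are below) =====
def Claim_equal_neighbor_lists_from_edge_set_py : Prop := ∀ (n_nodes : Int) (edges : List (Int × Int)), Dom_neighbor_lists_from_edge_set_py n_nodes edges → Pre_neighbor_lists_from_edge_set_py n_nodes edges → Spec_neighbor_lists_from_edge_set_py n_nodes edges (neighbor_lists_from_edge_set_py n_nodes edges)

-- ===== LEMMAS AND PROOFS =====

-- the flat list of directed pairs contributed by the edges
def pvFlat (edges : List (Int × Int)) : List (Int × Int) :=
  edges.flatMap (fun e => [(e.1, e.2), (e.2, e.1)])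

-- the neighbours of node i, in pair-list order
def pvSel (i : Int) (ps : List (Int × Int)) : List Int :=
  ps.filterMap (fun p => if p.1 = i then some p.2 else none)

-- the generic "update slot fst with snd" fold both ports reduce to
def pvScatter (g : List Int → Int → List Int) (s : List (List Int)) (ps : List (Int × Int)) : List (List Int) :=
  ps.foldl (fun s p => s.set p.1.toNat (g (s.getD p.1.toNat []) p.2)) s

-- B's grouping step
def pvGroup (lst : List Int) (b : Int) : List Int :=
  if lst.getLast? ≠ some b then lst ++ [b] else lst

-- Python's lexicographic order on int pairs
def pvLexR (p q : Int × Int) : Prop := p.1 < q.1 ∨ (p.1 = q.1 ∧ p.2 ≤ q.2)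

lemma pvScatter_length (g : List Int → Int → List Int) (ps : List (Int × Int)) (s : List (List Int)) :
    (pvScatter g s ps).length = s.length := by
  induction ps generalizing s with
  | nil => rfl
  | cons p ps ih =>
    rw [show pvScatter g s (p :: ps) = pvScatter g (s.set p.1.toNat (g (s.getD p.1.toNat []) p.2)) ps from rfl, ih]
    simp

lemma pvScatter_getD (g : List Int → Int → List Int) (ps : List (Int × Int)) (s : List (List Int))
    (hps : ∀ p ∈ ps, 0 ≤ p.1 ∧ p.1.toNat < s.length) (k : Nat) (hk : k < s.length) :
    (pvScatter g s ps).getD k [] =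
      (ps.filterMap (fun p => if p.1.toNat = k then some p.2 else none)).foldl g (s.getD k []) := by
  induction ps generalizing s with
  | nil => rfl
  | cons p ps ih =>
    have hp := hps p (by simp)
    have hrest : ∀ q ∈ ps, 0 ≤ q.1 ∧ q.1.toNat < (s.set p.1.toNat (g (s.getD p.1.toNat []) p.2)).length := by
      intro q hq; simpa using hps q (by simp [hq])
    have hstep := ih (s.set p.1.toNat (g (s.getD p.1.toNat []) p.2)) hrest (by simpa using hk)
    rw [show pvScatter g s (p :: ps) = pvScatter g (s.set p.1.toNat (g (s.getD p.1.toNat []) p.2)) ps from rfl, hstep]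
    by_cases hpk : p.1.toNat = k
    · rw [List.filterMap_cons, if_pos hpk, List.foldl_cons]
      congr 1
      subst hpk
      simp [List.getD_eq_getElem?_getD, hp.2]
    · rw [List.filterMap_cons, if_neg hpk]
      congr 1
      simp [List.getD_eq_getElem?_getD, List.getElem?_set_ne hpk]

lemma pvLex_insertBy (x : Int × Int) (ys : List (Int × Int)) (h : ys.Pairwise pvLexR) :
    (PySem.List.insertBy (fun a b => decide (a.1 < b.1) || (!decide (b.1 < a.1) && decide (a.2 < b.2))) x ys).Pairwise pvLexR := by
  induction ys with
  | nil => simp [PySem.List.insertBy, pvLexR]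
  | cons y ys ih =>
    rw [List.pairwise_cons] at h
    rw [PySem.List.insertBy]
    by_cases hb : (decide (x.1 < y.1) || (!decide (y.1 < x.1) && decide (x.2 < y.2))) = true
    · rw [if_pos hb]
      simp only [decide_eq_true_eq, Bool.or_eq_true, Bool.and_eq_true, Bool.not_eq_true', decide_eq_false_iff_not] at hb
      refine List.pairwise_cons.2 ⟨?_, List.pairwise_cons.2 ⟨h.1, h.2⟩⟩
      intro z hz
      rcases List.mem_cons.1 hz with rfl | hz'
      · unfold pvLexR; omega
      · have := h.1 z hz'
        unfold pvLexR at this ⊢; omega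
    · rw [if_neg hb]
      simp only [decide_eq_true_eq, Bool.or_eq_true, Bool.and_eq_true, Bool.not_eq_true', decide_eq_false_iff_not] at hb
      refine List.pairwise_cons.2 ⟨?_, ih h.2⟩
      intro z hz
      rcases (PySem.List.mem_insertBy _ _ _ _).1 hz with rfl | hz'
      · unfold pvLexR; omega
      · exact h.1 z hz'

-- sorted2 with fst/snd keys yields a lexicographically pairwise-ordered list
lemma pvSorted2_pairwise (xs : List (Int × Int)) :
    (PySem.List.sorted2 xs Prod.fst Prod.snd).Pairwise pvLexR := by
  rw [show PySem.List.sorted2 xs Prod.fst Prod.snd =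
      xs.foldl (fun acc x => PySem.List.insertBy (fun a b => decide (a.1 < b.1) || (!decide (b.1 < a.1) && decide (a.2 < b.2))) x acc) [] from rfl]
  have h : ∀ (acc : List (Int × Int)), acc.Pairwise pvLexR →
      (xs.foldl (fun acc x => PySem.List.insertBy (fun a b => decide (a.1 < b.1) || (!decide (b.1 < a.1) && decide (a.2 < b.2))) x acc) acc).Pairwise pvLexR := by
    induction xs with
    | nil => intro acc h; exact h
    | cons x xs ih => intro acc h; exact ih _ (pvLex_insertBy x acc h)
  exact h [] (by simp)

lemma pv_le_getLast : ∀ (l : List Int), l.Pairwise (· ≤ ·) → ∀ y ∈ l, ∃ z, l.getLast? = some z ∧ y ≤ z := by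
  intro l
  induction l with
  | nil => intro _ y hy; simp at hy
  | cons a t ih =>
    intro h y hy
    rw [List.pairwise_cons] at h
    cases t with
    | nil => rw [List.mem_singleton] at hy; subst hy; exact ⟨y, rfl, le_refl _⟩
    | cons c t' =>
      rcases List.mem_cons.1 hy with rfl | hy'
      · obtain ⟨z, hz, hcz⟩ := ih h.2 c (by simp)
        exact ⟨z, by simpa using hz, le_trans (h.1 c (by simp)) hcz⟩
      · obtain ⟨z, hz, hyz⟩ := ih h.2 y hy'
        exact ⟨z, by simpa using hz, hyz⟩

-- grouping a ≤-sorted list yields a <-sorted list holding exactly its elements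
lemma pvGroup_fold (m : List Int) : ∀ (acc : List Int), m.Pairwise (· ≤ ·) → acc.Pairwise (· < ·) →
    (∀ x ∈ m, ∀ y ∈ acc, y ≤ x) →
    (m.foldl pvGroup acc).Pairwise (· < ·) ∧ ∀ x, x ∈ m.foldl pvGroup acc ↔ x ∈ acc ∨ x ∈ m := by
  induction m with
  | nil => intro acc _ hacc _; exact ⟨hacc, by simp⟩
  | cons b m ih =>
    intro acc hm hacc hle
    rw [List.pairwise_cons] at hm
    rw [List.foldl_cons]
    by_cases hlast : acc.getLast? = some b
    · have hb_mem : b ∈ acc := List.mem_of_getLast? hlast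
      have h2 := ih acc hm.2 hacc (fun x hx y hy => hle x (by simp [hx]) y hy)
      rw [show pvGroup acc b = acc from by simp [pvGroup, hlast]]
      refine ⟨h2.1, fun x => ?_⟩
      rw [h2.2 x, List.mem_cons]
      constructor
      · tauto
      · rintro (h | rfl | h) <;> tauto
    · rw [show pvGroup acc b = acc ++ [b] from by simp [pvGroup, hlast]]
      have hacc' : (acc ++ [b]).Pairwise (· < ·) := by
        rw [List.pairwise_append]
        refine ⟨hacc, by simp, ?_⟩
        intro y hy z hz
        rw [List.mem_singleton] at hz; subst hz
        have h1 : y ≤ z := hle z (by simp) y hy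
        rcases eq_or_lt_of_le h1 with rfl | h2
        · exfalso
          obtain ⟨w, hw, hyw⟩ := pv_le_getLast acc (hacc.imp le_of_lt) y hy
          have hwy : w ≤ y := hle y (by simp) w (List.mem_of_getLast? hw)
          have hwe : w = y := le_antisymm hwy hyw
          exact hlast (hwe ▸ hw)
        · exact h2
      have hle' : ∀ x ∈ m, ∀ y ∈ acc ++ [b], y ≤ x := by
        intro x hx y hy
        rcases List.mem_append.1 hy with hy' | hy'
        · exact hle x (by simp [hx]) y hy'
        · rw [List.mem_singleton] at hy'; subst hy'; exact hm.1 x hx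
      have h2 := ih (acc ++ [b]) hm.2 hacc' hle'
      refine ⟨h2.1, fun x => ?_⟩
      rw [h2.2 x, List.mem_append, List.mem_singleton, List.mem_cons]
      tauto

-- A's edge loop as a pvScatter over the flat pair list
lemma pvA_fold (n : Int) : ∀ (edges : List (Int × Int)) (s : List (PySem.Set Int)),
    (∀ e ∈ edges, 0 ≤ e.1 ∧ e.1 < n ∧ 0 ≤ e.2 ∧ e.2 < n) →
    edges.foldl (fun nbr e =>
      if 0 ≤ e.1 ∧ e.1 < n ∧ 0 ≤ e.2 ∧ e.2 < n then
        let nbr1 := nbr.set e.1.toNat (PySem.Set.add (PySem.List.pyGetD nbr e.1 PySem.Set.empty) e.2)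
        nbr1.set e.2.toNat (PySem.Set.add (PySem.List.pyGetD nbr1 e.2 PySem.Set.empty) e.1)
      else nbr) s = pvScatter PySem.Set.add s (pvFlat edges) := by
  intro edges
  induction edges with
  | nil => intro s _; rfl
  | cons e es ih =>
    intro s hR
    have he := hR e (by simp)
    rw [List.foldl_cons, if_pos he]
    rw [show pvScatter PySem.Set.add s (pvFlat (e :: es)) =
        pvScatter PySem.Set.add ((s.set e.1.toNat (PySem.Set.add (s.getD e.1.toNat []) e.2)).set e.2.toNat
          (PySem.Set.add ((s.set e.1.toNat (PySem.Set.add (s.getD e.1.toNat []) e.2)).getD e.2.toNat []) e.1)) (pvFlat es) from rfl]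
    rw [← ih _ (fun q hq => hR q (by simp [hq]))]
    simp only [PySem.List.pyGetD_of_nonneg _ _ he.1, PySem.List.pyGetD_of_nonneg _ _ he.2.2.1]
    rfl

-- B's edge loop builds exactly the flat pair list
lemma pvB_flat (n : Int) (edges : List (Int × Int))
    (hR : ∀ e ∈ edges, 0 ≤ e.1 ∧ e.1 < n ∧ 0 ≤ e.2 ∧ e.2 < n) :
    edges.foldl (fun acc e =>
      if 0 ≤ e.1 ∧ e.1 < n ∧ 0 ≤ e.2 ∧ e.2 < n then acc ++ [(e.1, e.2), (e.2, e.1)] else acc) [] = pvFlat edges := by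
  rw [PySem.List.foldl_congr_mem edges _ (fun acc e => acc ++ [(e.1, e.2), (e.2, e.1)]) []
      (by intro acc x hx; rw [if_pos (hR x hx)])]
  simpa [pvFlat] using PySem.List.foldl_append_eq_flatMap (fun e => [(e.1, e.2), (e.2, e.1)]) edges []

-- B's grouping loop as a pvScatter
lemma pvB_fold (ps : List (Int × Int)) (s : List (List Int)) (hps : ∀ p ∈ ps, 0 ≤ p.1) :
    ps.foldl (fun out p =>
      out.set p.1.toNat (if (PySem.List.pyGetD out p.1 []).getLast? ≠ some p.2
        then PySem.List.pyGetD out p.1 [] ++ [p.2] else PySem.List.pyGetD out p.1 [])) s =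
    pvScatter pvGroup s ps := by
  refine PySem.List.foldl_congr_mem ps _ _ s ?_
  intro acc p hp
  simp only [PySem.List.pyGetD_of_nonneg _ _ (hps p hp), pvGroup]

-- ===== VERDICT (by name: the statement is the Claim_ definition above) =====
theorem neighbor_lists_from_edge_set_py_spec : Claim_equal_neighbor_lists_from_edge_set_py := by
  intro n edges _ hPre
  unfold Spec_neighbor_lists_from_edge_set_py
  unfold neighbor_lists_from_edge_set_py neighbor_lists_from_edge_set_py_alt
  simp only
  rw [pvA_fold n edges _ hPre, pvB_flat n edges hPre]
  have hFlatR : ∀ p ∈ pvFlat edges, 0 ≤ p.1 ∧ p.1 < n ∧ 0 ≤ p.2 ∧ p.2 < n := by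
    intro p hp
    simp only [pvFlat, List.mem_flatMap] at hp
    obtain ⟨e, he, hpe⟩ := hp
    have hE := hPre e he
    rw [List.mem_cons, List.mem_singleton] at hpe
    rcases hpe with h | h
    · rw [h]; exact ⟨hE.1, hE.2.1, hE.2.2.1, hE.2.2.2⟩
    · rw [h]; exact ⟨hE.2.2.1, hE.2.2.2, hE.1, hE.2.1⟩
  set flatA := pvFlat edges with hflatA
  set flatS := PySem.List.sorted2 flatA Prod.fst Prod.snd with hflatS
  have hSperm : flatS.Perm flatA := PySem.List.sorted2_perm flatA Prod.fst Prod.snd false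
  have hSR : ∀ p ∈ flatS, 0 ≤ p.1 ∧ p.1 < n ∧ 0 ≤ p.2 ∧ p.2 < n := by
    intro p hp; exact hFlatR p (hSperm.mem_iff.1 hp)
  rw [pvB_fold flatS _ (fun p hp => (hSR p hp).1)]
  have hlenA : (pvScatter PySem.Set.add (List.replicate n.toNat PySem.Set.empty) flatA).length = n.toNat := by
    rw [pvScatter_length]; simp
  have hlenB : (pvScatter pvGroup (List.replicate n.toNat []) flatS).length = n.toNat := by
    rw [pvScatter_length]; simp
  apply List.ext_getElem (by rw [List.length_map, hlenA, hlenB])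
  intro k hk1 hk2
  rw [List.length_map, hlenA] at hk1
  have hbA : ∀ p ∈ flatA, 0 ≤ p.1 ∧ p.1.toNat < (List.replicate n.toNat (PySem.Set.empty : PySem.Set Int)).length := by
    intro p hp
    have hE := hFlatR p hp
    refine ⟨hE.1, ?_⟩
    simp only [List.length_replicate]
    omega
  have hbB : ∀ p ∈ flatS, 0 ≤ p.1 ∧ p.1.toNat < (List.replicate n.toNat ([] : List Int)).length := by
    intro p hp
    have hE := hSR p hp
    refine ⟨hE.1, ?_⟩
    simp only [List.length_replicate]
    omega
  have hgA := pvScatter_getD PySem.Set.add flatA (List.replicate n.toNat PySem.Set.empty) hbA k (by simpa using hk1)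
  have hgB := pvScatter_getD pvGroup flatS (List.replicate n.toNat []) hbB k (by simpa using hk1)
  have hsel : ∀ (ps : List (Int × Int)), (∀ p ∈ ps, 0 ≤ p.1) →
      ps.filterMap (fun p => if p.1.toNat = k then some p.2 else none) = pvSel (k : Int) ps := by
    intro ps h
    apply List.filterMap_congr
    intro p hp
    have hP := h p hp
    by_cases hc : p.1 = (k : Int)
    · rw [if_pos hc, if_pos (by omega)]
    · rw [if_neg hc, if_neg (by omega)]
  rw [hsel flatA (fun p hp => (hFlatR p hp).1)] at hgA
  rw [hsel flatS (fun p hp => (hSR p hp).1)] at hgB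
  have hmS_sorted : (pvSel (k : Int) flatS).Pairwise (· ≤ ·) := by
    have hpw := pvSorted2_pairwise flatA
    rw [← hflatS] at hpw
    unfold pvSel
    rw [List.pairwise_filterMap]
    refine hpw.imp ?_
    intro a b hab x hx y hy
    by_cases ha : a.1 = (k : Int)
    · rw [if_pos ha] at hx
      by_cases hb' : b.1 = (k : Int)
      · rw [if_pos hb'] at hy
        unfold pvLexR at hab
        cases hx; cases hy; omega
      · rw [if_neg hb'] at hy; cases hy
    · rw [if_neg ha] at hx; cases hx
  have hperm : (pvSel (k : Int) flatS).Perm (pvSel (k : Int) flatA) :=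
    List.Perm.filterMap _ hSperm
  have hgrp := pvGroup_fold (pvSel (k : Int) flatS) [] hmS_sorted (by simp) (by simp)
  rw [List.getElem_map]
  rw [List.getD_eq_getElem _ _ (by rw [pvScatter_length]; simpa using hk1)] at hgA
  rw [List.getD_eq_getElem _ _ (by rw [pvScatter_length]; simpa using hk1)] at hgB
  rw [hgA, hgB]
  rw [List.getD_replicate _ (by simpa using hk1), List.getD_replicate _ (by simpa using hk1)]
  rw [show (PySem.Set.empty : PySem.Set Int) = ([] : List Int) from rfl]
  rw [← PySem.Set.ofList_eq_foldl]
  apply PySem.List.sorted_eq_of_perm_of_pairwise_lt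
  · rw [List.perm_ext_iff_of_nodup (hgrp.1.imp (fun h => ne_of_lt h)) (PySem.Set.nodup_ofList _)]
    intro x
    rw [hgrp.2 x, PySem.Set.mem_ofList, hperm.mem_iff]
    simp
  · exact hgrp.1
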